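-- pv_equiv track=rewrite | github.com/atnguyen1/AdventofCode2023 | Day11/Day11part2.py | manahatten
-- ===== SOURCE A (Python) =====
-- GSIZE = 1000000
--
-- def manahatten(x1, x2, y1, y2, yranges, xranges):
--     if y2 > y1:
--         ymax = y2
--         ymin = y1
--     else:
--         ymax = y1
--         ymin = y2
--
--     if x2 > x1:
--         xmax = x2
--         xmin = x1
--     else:
--         xmax = x1
--         xmin = x2
--
--     y_crossings = []
--     x_crossings = []
--
--     for y in yranges:
--         if ymin < y and y < ymax:
--             y_crossings.append(y)
--
--     for x in xranges:
--         if xmin < x and x < xmax: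
--             x_crossings.append(x)
--
--     return ((abs(x1 - x2) - len(x_crossings) + (len(x_crossings) * GSIZE)) + ((abs(y1 - y2) - len(y_crossings)) + (len(y_crossings) * GSIZE)))
-- ===== SOURCE B (Python) =====
-- GSIZE = 1000000
--
-- def _bisect(a, x, right):
--     # hand-written binary search (bisect_left if right is False, bisect_right if True)
--     lo = 0
--     hi = len(a)
--     while lo < hi:
--         mid = (lo + hi) // 2
--         if a[mid] < x or (right and a[mid] == x):
--             lo = mid + 1
--         else:
--             hi = mid
--     return lo
--
-- def manahatten(x1, x2, y1, y2, yranges, xranges):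
--     ys = sorted(yranges)
--     xs = sorted(xranges)
--     ylo, yhi = min(y1, y2), max(y1, y2)
--     xlo, xhi = min(x1, x2), max(x1, x2)
--     yc = max(0, _bisect(ys, yhi, False) - _bisect(ys, ylo, True))
--     xc = max(0, _bisect(xs, xhi, False) - _bisect(xs, xlo, True))
--     return (xhi - xlo) + xc * (GSIZE - 1) + (yhi - ylo) + yc * (GSIZE - 1)
-- ===== Notes on version B (the rewrite author's own statement) =====
-- stated objective: alternative
-- what changed: B sorts each range list once and counts crossings in the open interval with a hand-written binary search (bisect_left/bisect_right difference) instead of A's linear scan that materialises a crossings list; the arithmetic is folded into span + count*(GSIZE-1).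
import Mathlib
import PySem

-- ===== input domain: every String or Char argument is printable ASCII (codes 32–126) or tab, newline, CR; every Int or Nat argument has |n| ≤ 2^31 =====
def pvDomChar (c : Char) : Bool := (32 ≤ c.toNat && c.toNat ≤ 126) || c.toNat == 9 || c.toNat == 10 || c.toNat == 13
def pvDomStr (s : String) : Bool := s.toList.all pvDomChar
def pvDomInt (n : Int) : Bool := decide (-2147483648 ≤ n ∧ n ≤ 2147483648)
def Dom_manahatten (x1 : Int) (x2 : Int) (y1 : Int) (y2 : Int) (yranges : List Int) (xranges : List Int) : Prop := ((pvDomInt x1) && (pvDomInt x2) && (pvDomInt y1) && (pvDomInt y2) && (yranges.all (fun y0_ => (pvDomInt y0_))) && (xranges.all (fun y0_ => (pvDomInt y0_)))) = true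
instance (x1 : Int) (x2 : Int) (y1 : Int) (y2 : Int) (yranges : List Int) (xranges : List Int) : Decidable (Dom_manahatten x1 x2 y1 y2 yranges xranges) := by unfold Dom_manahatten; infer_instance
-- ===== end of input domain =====

-- B replaces A's linear scan over each range list by sort-once + binary search; alternative algorithm, equal value proved on all inputs.

-- ===== PORT A =====
def pvGSIZE : Int := 1000000

def manahatten (x1 : Int) (x2 : Int) (y1 : Int) (y2 : Int) (yranges : List Int) (xranges : List Int) : Int :=
  let ymax := if y2 > y1 then y2 else y1
  let ymin := if y2 > y1 then y1 else y2
  let xmax := if x2 > x1 then x2 else x1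
  let xmin := if x2 > x1 then x1 else x2
  let y_crossings : List Int := yranges.foldl (fun acc y => if ymin < y ∧ y < ymax then acc ++ [y] else acc) []
  let x_crossings : List Int := xranges.foldl (fun acc x => if xmin < x ∧ x < xmax then acc ++ [x] else acc) []
  ((|x1 - x2| - (x_crossings.length : Int) + ((x_crossings.length : Int) * pvGSIZE)) + ((|y1 - y2| - (y_crossings.length : Int)) + ((y_crossings.length : Int) * pvGSIZE)))

-- ===== PORT B =====
-- hand-written binary search from Source B (_bisect): bisect_left when right=false, bisect_right when right=true
def pvBisect (a : List Int) (x : Int) (right : Bool) : Nat → Nat → Nat → Nat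
  | 0, lo, _ => lo
  | fuel + 1, lo, hi =>
    if lo < hi then
      if a.getD ((lo + hi) / 2) 0 < x ∨ (right = true ∧ a.getD ((lo + hi) / 2) 0 = x) then
        pvBisect a x right fuel ((lo + hi) / 2 + 1) hi
      else
        pvBisect a x right fuel lo ((lo + hi) / 2)
    else lo

def manahatten_alt (x1 : Int) (x2 : Int) (y1 : Int) (y2 : Int) (yranges : List Int) (xranges : List Int) : Int :=
  let ys := PySem.List.sorted yranges (fun v => v) false
  let xs := PySem.List.sorted xranges (fun v => v) false
  let ylo := min y1 y2
  let yhi := max y1 y2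
  let xlo := min x1 x2
  let xhi := max x1 x2
  let yc : Int := max 0 ((pvBisect ys yhi false ys.length 0 ys.length : Int) - (pvBisect ys ylo true ys.length 0 ys.length : Int))
  let xc : Int := max 0 ((pvBisect xs xhi false xs.length 0 xs.length : Int) - (pvBisect xs xlo true xs.length 0 xs.length : Int))
  (xhi - xlo) + xc * (pvGSIZE - 1) + (yhi - ylo) + yc * (pvGSIZE - 1)

-- ===== PRECONDITION & SPEC =====
def Spec_manahatten (x1 : Int) (x2 : Int) (y1 : Int) (y2 : Int) (yranges : List Int) (xranges : List Int) (out : Int) : Prop := out = manahatten_alt x1 x2 y1 y2 yranges xranges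
instance (x1 : Int) (x2 : Int) (y1 : Int) (y2 : Int) (yranges : List Int) (xranges : List Int) (out : Int) : Decidable (Spec_manahatten x1 x2 y1 y2 yranges xranges out) := by unfold Spec_manahatten; infer_instance

-- ===== CLAIM (what is proved, stated in full; the proofs are below) =====
def Claim_equal_manahatten : Prop := ∀ (x1 : Int) (x2 : Int) (y1 : Int) (y2 : Int) (yranges : List Int) (xranges : List Int), Dom_manahatten x1 x2 y1 y2 yranges xranges → Spec_manahatten x1 x2 y1 y2 yranges xranges (manahatten x1 x2 y1 y2 yranges xranges)

-- ===== LEMMAS AND PROOFS =====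

-- a downward-closed predicate on a sorted list holds exactly on the first countP indices
theorem countP_char (P : Int → Prop) [DecidablePred P]
    (hdc : ∀ v w : Int, v ≤ w → P w → P v) :
    ∀ (l : List Int), l.Pairwise (· ≤ ·) →
    ∀ i (h : i < l.length), (i < l.countP (fun v => decide (P v)) ↔ P l[i]) := by
  intro l
  induction l with
  | nil => intro _ i h; simp at h
  | cons a t ih =>
    intro hp i h
    rcases List.pairwise_cons.mp hp with ⟨hall, htp⟩
    by_cases hPa : P a
    · have hc : (a :: t).countP (fun v => decide (P v)) = t.countP (fun v => decide (P v)) + 1 := by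
        simp [hPa]
      cases i with
      | zero =>
        rw [hc]
        simp only [List.getElem_cons_zero]
        exact ⟨fun _ => hPa, fun _ => by omega⟩
      | succ j =>
        have hj : j < t.length := by simpa using h
        have hiff := ih htp j hj
        rw [hc]
        simp only [List.getElem_cons_succ]
        exact ⟨fun hlt => hiff.mp (by omega), fun hP => by have := hiff.mpr hP; omega⟩
    · have hnone : ∀ v ∈ t, ¬ P v := fun v hv hPv => hPa (hdc a v (hall v hv) hPv)
      have hct : t.countP (fun v => decide (P v)) = 0 :=
        List.countP_eq_zero.mpr (by intro v hv; simpa using hnone v hv)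
      have hc : (a :: t).countP (fun v => decide (P v)) = 0 := by
        simp [hPa, hct]
      rw [hc]
      cases i with
      | zero => simpa using hPa
      | succ j =>
        have hj : j < t.length := by simpa using h
        simpa using hnone t[j] (List.getElem_mem hj)

-- the binary search returns c when c is characterised as in countP_char
theorem pvBisect_eq (a : List Int) (x : Int) (r : Bool) (c : Nat)
    (hchar : ∀ i (h : i < a.length), (i < c ↔ (a[i] < x ∨ (r = true ∧ a[i] = x)))) :
    ∀ n lo hi, hi - lo ≤ n → lo ≤ c → c ≤ hi → hi ≤ a.length → pvBisect a x r n lo hi = c := by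
  intro n
  induction n with
  | zero => intro lo hi h1 h2 h3 h4; simp only [pvBisect]; omega
  | succ m ih =>
    intro lo hi h1 h2 h3 h4
    simp only [pvBisect]
    by_cases hlh : lo < hi
    · simp only [if_pos hlh]
      have hmid : (lo + hi) / 2 < a.length := by omega
      have hget : a.getD ((lo + hi) / 2) 0 = a[(lo + hi) / 2] := List.getD_eq_getElem a 0 hmid
      by_cases hP : a.getD ((lo + hi) / 2) 0 < x ∨ (r = true ∧ a.getD ((lo + hi) / 2) 0 = x)
      · simp only [if_pos hP]
        have hc : (lo + hi) / 2 < c := (hchar _ hmid).mpr (by rw [hget] at hP; exact hP)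
        exact ih _ _ (by omega) (by omega) h3 h4
      · simp only [if_neg hP]
        have hc : c ≤ (lo + hi) / 2 := by
          by_contra hcon
          exact hP (by rw [hget]; exact (hchar _ hmid).mp (by omega))
        exact ih _ _ (by omega) h2 hc (by omega)
    · simp only [if_neg hlh]; omega

-- bisect on the sorted list computes countP of the corresponding downward-closed predicate
theorem pvBisect_countP (s : List Int) (hs : s.Pairwise (· ≤ ·)) (x : Int) (r : Bool) :
    pvBisect s x r s.length 0 s.length = s.countP (fun v => decide (v < x ∨ (r = true ∧ v = x))) := by
  have hdc : ∀ v w : Int, v ≤ w → (w < x ∨ (r = true ∧ w = x)) → (v < x ∨ (r = true ∧ v = x)) := by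
    intro v w hvw hw
    rcases hw with hw | ⟨hr, hw⟩
    · exact Or.inl (by omega)
    · rcases lt_or_eq_of_le (hw ▸ hvw) with h | h
      · exact Or.inl h
      · exact Or.inr ⟨hr, h⟩
  have hle : s.countP (fun v => decide (v < x ∨ (r = true ∧ v = x))) ≤ s.length := List.countP_le_length
  exact pvBisect_eq s x r _ (countP_char _ hdc s hs) s.length 0 s.length (by omega) (by omega) hle (le_refl _)

-- counting the open interval equals the difference of the two one-sided counts (any list)
theorem countP_interval (mn mx : Int) (l : List Int) :
    ((l.countP (fun y => decide (mn < y ∧ y < mx)) : Int)) =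
    max 0 ((l.countP (fun v => decide (v < mx)) : Int) - (l.countP (fun v => decide (v ≤ mn)) : Int)) := by
  induction l with
  | nil => simp
  | cons a t ih =>
    by_cases hmm : mn < mx
    · have key : ∀ l' : List Int, l'.countP (fun y => decide (mn < y ∧ y < mx)) + l'.countP (fun v => decide (v ≤ mn)) = l'.countP (fun v => decide (v < mx)) := by
        intro l'
        induction l' with
        | nil => simp
        | cons b u ihu =>
          simp only [List.countP_cons, decide_eq_true_eq]
          split_ifs <;> omega
      have h1 := key (a :: t)
      have h2 : (a :: t).countP (fun v => decide (v ≤ mn)) ≤ (a :: t).countP (fun v => decide (v < mx)) := by omega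
      omega
    · have hz : (a :: t).countP (fun y => decide (mn < y ∧ y < mx)) = 0 := by
        apply List.countP_eq_zero.mpr
        intro v hv
        simp only [decide_eq_true_eq]
        omega
      have hmono : (a :: t).countP (fun v => decide (v < mx)) ≤ (a :: t).countP (fun v => decide (v ≤ mn)) := by
        apply List.countP_mono_left
        intro v hv h
        simp only [decide_eq_true_eq] at h ⊢
        omega
      omega

-- one axis: A's crossings count (over the raw list) expressed through B's two bisects on the sorted list
theorem axis_count (l : List Int) (v1 v2 : Int) :
    ((l.foldl (fun acc y => if min v1 v2 < y ∧ y < max v1 v2 then acc ++ [y] else acc) ([] : List Int)).length : Int) =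
    max 0 ((pvBisect (PySem.List.sorted l (fun v => v) false) (max v1 v2) false (PySem.List.sorted l (fun v => v) false).length 0 (PySem.List.sorted l (fun v => v) false).length : Int)
         - (pvBisect (PySem.List.sorted l (fun v => v) false) (min v1 v2) true (PySem.List.sorted l (fun v => v) false).length 0 (PySem.List.sorted l (fun v => v) false).length : Int)) := by
  set s := PySem.List.sorted l (fun v => v) false with hsdef
  have hs : s.Pairwise (· ≤ ·) := PySem.List.sorted_pairwise l (fun v => v) 
  have hperm : s.Perm l := PySem.List.sorted_perm l (fun v => v) false
  rw [PySem.List.foldl_append_ite_eq_filter]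
  rw [pvBisect_countP s hs (max v1 v2) false, pvBisect_countP s hs (min v1 v2) true]
  have e1 : s.countP (fun v => decide (v < max v1 v2 ∨ (false = true ∧ v = max v1 v2))) = s.countP (fun v => decide (v < max v1 v2)) := by
    apply List.countP_congr; intro v _; simp
  have e2 : s.countP (fun v => decide (v < min v1 v2 ∨ (true = true ∧ v = min v1 v2))) = s.countP (fun v => decide (v ≤ min v1 v2)) := by
    apply List.countP_congr; intro v _
    simp only [decide_eq_true_eq, true_and]
    omega
  rw [e1, e2]
  have hpc : ∀ p : Int → Bool, s.countP p = l.countP p := fun p => hperm.countP_eq p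
  rw [hpc, hpc]
  simp only [List.nil_append]
  rw [← List.countP_eq_length_filter]
  exact countP_interval (min v1 v2) (max v1 v2) l

-- ===== VERDICT (by name: the statement is the Claim_ definition above) =====
theorem manahatten_spec : Claim_equal_manahatten := by
  intro x1 x2 y1 y2 yranges xranges _
  unfold Spec_manahatten manahatten manahatten_alt
  have hy := axis_count yranges y1 y2
  have hx := axis_count xranges x1 x2
  have hymax : (if y2 > y1 then y2 else y1) = max y1 y2 := by
    split <;> omega
  have hymin : (if y2 > y1 then y1 else y2) = min y1 y2 := by
    split <;> omega
  have hxmax : (if x2 > x1 then x2 else x1) = max x1 x2 := by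
    split <;> omega
  have hxmin : (if x2 > x1 then x1 else x2) = min x1 x2 := by
    split <;> omega
  simp only [hymax, hymin, hxmax, hxmin]
  rw [hy, hx]
  have hax : |x1 - x2| = max x1 x2 - min x1 x2 := by
    rcases le_total x1 x2 with h | h
    · rw [abs_of_nonpos (by omega)]; omega
    · rw [abs_of_nonneg (by omega)]; omega
  have hay : |y1 - y2| = max y1 y2 - min y1 y2 := by
    rcases le_total y1 y2 with h | h
    · rw [abs_of_nonpos (by omega)]; omega
    · rw [abs_of_nonneg (by omega)]; omega
  rw [hax, hay]
  ring
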